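-- pv_equiv track=rewrite | github.com/Calmstock/SMR | extract_products.py | parse_sql_value
-- ===== SOURCE A (Python) =====
-- def parse_sql_value(s, start=0):
--     """Parse a single SQL value starting at position start, handling quotes and escapes."""
--     if start >= len(s):
--         return None, start
--
--     if s[start] == "'":
--         # Quoted string - find matching end quote
--         i = start + 1
--         result = []
--         while i < len(s):
--             if s[i] == '\\' and i + 1 < len(s):
--                 # Escaped character
--                 result.append(s[i:i+2])
--                 i += 2
--             elif s[i] == "'":
--                 if i + 1 < len(s) and s[i+1] == "'":
--                     # Doubled quote
--                     result.append("'")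
--                     i += 2
--                 else:
--                     # End of string
--                     return ''.join(result), i + 1
--             else:
--                 result.append(s[i])
--                 i += 1
--         return ''.join(result), i
--     else:
--         # Unquoted value (number or NULL)
--         end = start
--         while end < len(s) and s[end] not in ',)':
--             end += 1
--         return s[start:end], end
-- ===== SOURCE B (Python) =====
-- def parse_sql_value(s, start=0):
--     """Parse a single SQL value starting at position start, handling quotes and escapes."""
--     n = len(s)
--     if start >= n:
--         return None, start
--
--     if s[start] != "'":
--         # Unquoted value: it runs to the first ',' or ')' (or the end), found in one shot
--         end = n
--         for d in ",)":
--             k = s.find(d, start)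
--             if k != -1 and k < end:
--                 end = k
--         return s[start:end], end
--
--     # Quoted string: scan by segment — jump to the next quote or backslash, copy the
--     # plain stretch in one slice, then resolve that one special character.  The two
--     # find results are cached and refreshed only once the scan has moved past them.
--     parts = []
--     i = start + 1
--     q = s.find("'", i)
--     b = s.find('\\', i)
--     while True:
--         if q != -1 and q < i:
--             q = s.find("'", i)
--         if b != -1 and b < i:
--             b = s.find('\\', i)
--         if b != -1 and (q == -1 or b < q):
--             if b + 1 < n:
--                 parts.append(s[i:b + 2])      # plain stretch + escaped pair
--                 i = b + 2
--             else:
--                 parts.append(s[i:])           # trailing backslash: ordinary text to the end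
--                 return ''.join(parts), n
--         elif q != -1:
--             parts.append(s[i:q])
--             if q + 1 < n and s[q + 1] == "'":
--                 parts.append("'")             # doubled quote
--                 i = q + 2
--             else:
--                 return ''.join(parts), q + 1  # closing quote
--         else:
--             parts.append(s[i:])               # unterminated string
--             return ''.join(parts), n
-- ===== Notes on version B (the rewrite author's own statement) =====
-- stated objective: faster
-- what changed: B scans by segment instead of by character: cached s.find results locate the next quote/backslash (or ',' / ')' delimiter) and whole plain stretches are appended as single slices, so the per-character Python-level loop of A disappears (C-level find/slice do the work).
-- outside the precondition, e.g. on parse_sql_value("'a'", -3): A returns ("a'a", 3), B returns ('a', 3)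
import Mathlib
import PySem

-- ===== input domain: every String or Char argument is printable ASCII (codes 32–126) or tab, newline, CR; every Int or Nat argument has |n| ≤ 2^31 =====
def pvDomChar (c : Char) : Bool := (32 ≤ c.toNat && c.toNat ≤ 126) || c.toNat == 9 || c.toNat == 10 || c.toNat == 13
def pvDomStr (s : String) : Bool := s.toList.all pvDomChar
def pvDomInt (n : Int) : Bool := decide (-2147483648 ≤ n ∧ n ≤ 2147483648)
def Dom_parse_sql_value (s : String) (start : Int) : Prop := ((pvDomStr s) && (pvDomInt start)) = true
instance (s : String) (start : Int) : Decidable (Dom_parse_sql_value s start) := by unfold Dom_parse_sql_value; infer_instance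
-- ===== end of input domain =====

-- B replaces A's character-by-character scan by a segment scan driven by cached str.find
-- results, measured faster at large sizes (objective: faster); A = B is proved for start ≥ 0 (Pre_ below).

-- ===== PORT A =====
-- A's quoted-branch while loop: `result` is the Python list of appended strings,
-- ''.join(result) is PySem.Chars.join []; the cursor i is ≥ 0 in Python, hence Nat.
def pvAQuoted (cs : List Char) (i : Nat) (result : List (List Char)) : List Char × Int :=
  if h : i < cs.length then
    if cs[i] = '\\' ∧ i + 1 < cs.length then
      pvAQuoted cs (i + 2) (result ++ [PySem.List.slice cs (some (i : Int)) (some ((i : Int) + 2))])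
    else if cs[i] = '\'' then
      if i + 1 < cs.length ∧ cs.getD (i + 1) default = '\'' then
        pvAQuoted cs (i + 2) (result ++ [['\'']])
      else (PySem.Chars.join [] result, (i : Int) + 1)
    else
      pvAQuoted cs (i + 1) (result ++ [[cs[i]]])
  else (PySem.Chars.join [] result, (i : Int))
termination_by cs.length - i

def pvAEnd (cs : List Char) (e : Nat) : Nat :=
  if h : e < cs.length then
    if ¬(cs[e] = ',' ∨ cs[e] = ')') then pvAEnd cs (e + 1) else e
  else e
termination_by cs.length - e

def parse_sql_value (s : String) (start : Int) : Option String × Int :=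
  let cs := s.toList
  if start ≥ (cs.length : Int) then (none, start)
  else if PySem.List.pyGet? cs start = some '\'' then
    -- start.toNat is exact here: Pre_ gives 0 ≤ start
    let r := pvAQuoted cs (start.toNat + 1) []
    (some (String.ofList r.1), r.2)
  else
    let e := pvAEnd cs start.toNat
    (some (String.ofList (PySem.List.slice cs (some start) (some ((e : Nat) : Int)))), ((e : Nat) : Int))

-- ===== PORT B =====
-- B's quoted-branch loop; q and b are the cached find results, refreshed only when the
-- cursor has moved past them.  fuel only makes the recursion structural (the call below
-- passes cs.length + 1, more than the loop can iterate; the fuel-0 value is never used).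
def pvBQuoted (cs : List Char) (fuel : Nat) (i : Nat) (q b : Int) (parts : List (List Char)) : List Char × Int :=
  match fuel with
  | 0 => (PySem.Chars.join [] parts, (i : Int))
  | fuel + 1 =>
    let q := if q ≠ -1 ∧ q < (i : Int) then PySem.Chars.findFrom cs ['\''] (i : Int) else q
    let b := if b ≠ -1 ∧ b < (i : Int) then PySem.Chars.findFrom cs ['\\'] (i : Int) else b
    if b ≠ -1 ∧ (q = -1 ∨ b < q) then
      if b + 1 < (cs.length : Int) then
        pvBQuoted cs fuel (b.toNat + 2) q b (parts ++ [PySem.List.slice cs (some (i : Int)) (some (b + 2))])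
      else (PySem.Chars.join [] (parts ++ [PySem.List.slice cs (some (i : Int)) none]), (cs.length : Int))
    else if q ≠ -1 then
      let parts := parts ++ [PySem.List.slice cs (some (i : Int)) (some q)]
      if q + 1 < (cs.length : Int) ∧ cs.getD (q.toNat + 1) default = '\'' then
        pvBQuoted cs fuel (q.toNat + 2) q b (parts ++ [['\'']])
      else (PySem.Chars.join [] parts, q + 1)
    else (PySem.Chars.join [] (parts ++ [PySem.List.slice cs (some (i : Int)) none]), (cs.length : Int))

def parse_sql_value_alt (s : String) (start : Int) : Option String × Int :=
  let cs := s.toList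
  let n : Int := (cs.length : Int)
  if start ≥ n then (none, start)
  else if ¬(PySem.List.pyGet? cs start = some '\'') then
    let e := [',', ')'].foldl (fun e d =>
      let k := PySem.Chars.findFrom cs [d] start
      if k ≠ -1 ∧ k < e then k else e) n
    (some (String.ofList (PySem.List.slice cs (some start) (some e))), e)
  else
    let i := start.toNat + 1          -- 0 ≤ start under Pre_
    let q := PySem.Chars.findFrom cs ['\''] (i : Int)
    let b := PySem.Chars.findFrom cs ['\\'] (i : Int)
    let r := pvBQuoted cs (cs.length + 1) i q b []
    (some (String.ofList r.1), r.2)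

-- ===== PRECONDITION & SPEC =====
-- Pre_ excludes negative start, which is outside the parser's natural domain of
-- positions: there A's value comes from Python negative-index wraparound mixed with
-- slice clamping (and A raises IndexError for start < -len(s)), while B's find-based
-- scan reads start as a clamped search position — neither corner value is specified.
def Pre_parse_sql_value (s : String) (start : Int) : Prop := 0 ≤ start
instance (s : String) (start : Int) : Decidable (Pre_parse_sql_value s start) := by
  unfold Pre_parse_sql_value; infer_instance
def pvWitness_parse_sql_value : String × Int := ("'a'", 0)

def Spec_parse_sql_value (s : String) (start : Int) (out : Option String × Int) : Prop :=
  out = parse_sql_value_alt s start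
instance (s : String) (start : Int) (out : Option String × Int) : Decidable (Spec_parse_sql_value s start out) := by
  unfold Spec_parse_sql_value; infer_instance

-- ===== CLAIM (what is proved, stated in full; the proofs are below) =====
def Claim_equal_parse_sql_value : Prop := ∀ (s : String) (start : Int),
  Dom_parse_sql_value s start → Pre_parse_sql_value s start →
  Spec_parse_sql_value s start (parse_sql_value s start)

-- ===== LEMMAS AND PROOFS =====

theorem pvJoinNil (ps : List (List Char)) : PySem.Chars.join [] ps = ps.flatten := by
  induction ps with
  | nil => simp [PySem.Chars.join_nil]
  | cons a t ih =>
    cases t with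
    | nil => simp [PySem.Chars.join_singleton]
    | cons b r => simp only [PySem.Chars.join_cons_cons] at ih ⊢; simp [ih]

theorem pvFlattenSingletons (l : List Char) : (l.map (fun c => [c])).flatten = l := by
  rw [← pvJoinNil, PySem.Chars.join_nil_singletons]

theorem pvPrefixSingleton (c : Char) (t : List Char) : ([c] <+: t) ↔ t.head? = some c := by
  cases t <;> simp [List.cons_prefix_cons, eq_comm]

theorem pvPrefixDrop (cs : List Char) (c : Char) (j : Nat) :
    ([c] <+: cs.drop j) ↔ cs[j]? = some c := by
  rw [pvPrefixSingleton, List.head?_drop]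

theorem pvGetSome (cs : List Char) (j : Nat) (h : j < cs.length) :
    cs[j]? = some (cs.getD j default) := by
  simp [List.getD_eq_getElem cs default h, List.getElem?_eq_getElem h]

theorem pvFindUnique (u : List Char) (c : Char) (m : Nat) (hm : m < u.length)
    (hc : u.getD m default = c) (hmin : ∀ j, j < m → u.getD j default ≠ c) :
    PySem.Chars.find u [c] = (m : Int) := by
  have hocc : [c] <+: u.drop m := by rw [pvPrefixDrop, pvGetSome u m hm, hc]
  have hmem : c ∈ u := by
    have : c ∈ u.drop m := by
      rcases hocc with ⟨r, hr⟩; rw [← hr]; simp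
    exact List.mem_of_mem_drop this
  have hnn : 0 ≤ PySem.Chars.find u [c] := by
    rw [PySem.Chars.find_nonneg_iff, List.singleton_infix_iff]; exact hmem
  obtain ⟨hpre, hmin'⟩ := PySem.Chars.find_spec hnn
  set f := (PySem.Chars.find u [c]).toNat with hf
  have hfe : u[f]? = some c := (pvPrefixDrop u c f).mp hpre
  have hflen : f < u.length := by
    by_contra hnot
    rw [List.getElem?_eq_none (by omega)] at hfe; simp at hfe
  rcases lt_trichotomy f m with h | h | h
  · exact absurd (by rw [pvGetSome u f hflen] at hfe; exact Option.some.inj hfe) (hmin f h)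
  · omega
  · exact absurd ((pvPrefixDrop u c m).mpr (by rw [pvGetSome u m hm, hc])) (hmin' m h)

theorem pvFFUnique (cs : List Char) (c : Char) (k m : Nat) (hk : k ≤ cs.length)
    (hkm : k ≤ m) (hm : m < cs.length) (hc : cs.getD m default = c)
    (hmin : ∀ j, k ≤ j → j < m → cs.getD j default ≠ c) :
    PySem.Chars.findFrom cs [c] (k : Int) = (m : Int) := by
  rw [PySem.Chars.findFrom_natCast cs [c] k hk]
  have hlen : (cs.drop k).length = cs.length - k := List.length_drop ..
  have hgd : ∀ j, k + j < cs.length → (cs.drop k).getD j default = cs.getD (k + j) default := by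
    intro j hj
    rw [List.getD_eq_getElem _ default (by omega), List.getD_eq_getElem _ default hj, List.getElem_drop]
  have hfind : PySem.Chars.find (cs.drop k) [c] = ((m - k : Nat) : Int) := by
    apply pvFindUnique
    · omega
    · rw [hgd (m - k) (by omega)]; rw [show k + (m - k) = m by omega]; exact hc
    · intro j hj hcj
      rw [hgd j (by omega)] at hcj
      exact hmin (k + j) (by omega) (by omega) hcj
  rw [hfind]
  have : ((m - k : Nat) : Int) ≠ -1 := by omega
  simp only [this, if_false]
  omega

theorem pvFFNone (cs : List Char) (c : Char) (k : Nat) (hk : k ≤ cs.length) :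
    PySem.Chars.findFrom cs [c] (k : Int) = -1 ↔
      ∀ j, k ≤ j → j < cs.length → cs.getD j default ≠ c := by
  rw [PySem.Chars.findFrom_natCast_eq_neg_one_iff cs [c] k hk, List.singleton_infix_iff]
  constructor
  · intro hnm j hj1 hj2 hcj
    apply hnm
    have : (cs.drop k)[j - k]'(by simp; omega) = c := by
      rw [List.getElem_drop]; rw [← List.getD_eq_getElem cs default (by omega)]
      rw [show k + (j - k) = j by omega]; exact hcj
    rw [← this]; exact List.getElem_mem _
  · intro hall hmem
    obtain ⟨j, hj, hje⟩ := List.mem_iff_getElem.mp hmem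
    have hjl : k + j < cs.length := by have := hj; simp at this; omega
    exact hall (k + j) (by omega) hjl (by rw [List.getD_eq_getElem cs default hjl, ← List.getElem_drop]; exact hje)

theorem pvFFSpec (cs : List Char) (c : Char) (k : Nat) (hk : k ≤ cs.length)
    (h : PySem.Chars.findFrom cs [c] (k : Int) ≠ -1) :
    (k : Int) ≤ PySem.Chars.findFrom cs [c] (k : Int) ∧
    (PySem.Chars.findFrom cs [c] (k : Int)).toNat < cs.length ∧
    cs.getD (PySem.Chars.findFrom cs [c] (k : Int)).toNat default = c ∧
    (∀ j, k ≤ j → j < (PySem.Chars.findFrom cs [c] (k : Int)).toNat → cs.getD j default ≠ c) := by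
  obtain ⟨h1, h2, h3⟩ := PySem.Chars.findFrom_natCast_spec cs [c] k hk h
  have hfe := (pvPrefixDrop cs c _).mp h2
  have hflen : (PySem.Chars.findFrom cs [c] (k : Int)).toNat < cs.length := by
    by_contra hnot
    rw [List.getElem?_eq_none (by omega)] at hfe; simp at hfe
  refine ⟨h1, hflen, ?_, ?_⟩
  · rw [pvGetSome cs _ hflen] at hfe; exact Option.some.inj hfe
  · intro j hj1 hj2 hcj
    exact h3 j hj1 hj2 ((pvPrefixDrop cs c j).mpr (by rw [pvGetSome cs j (by omega), hcj]))

theorem pvFFHit (cs : List Char) (c : Char) (k : Nat) (hk : k < cs.length)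
    (hc : cs.getD k default = c) : PySem.Chars.findFrom cs [c] (k : Int) = (k : Int) :=
  pvFFUnique cs c k k (by omega) le_rfl hk hc (by omega)

theorem pvFFStep (cs : List Char) (c : Char) (k : Nat) (hk : k < cs.length)
    (hc : cs.getD k default ≠ c) :
    PySem.Chars.findFrom cs [c] (k : Int) = PySem.Chars.findFrom cs [c] ((k + 1 : Nat) : Int) := by
  by_cases h2 : PySem.Chars.findFrom cs [c] ((k + 1 : Nat) : Int) = -1
  · rw [h2, pvFFNone cs c k (by omega)]
    intro j hj1 hj2
    rcases Nat.eq_or_lt_of_le hj1 with h | h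
    · rw [← h]; exact hc
    · exact (pvFFNone cs c (k + 1) (by omega)).mp h2 j (by omega) hj2
  · obtain ⟨h1, hflen, hce, hmin⟩ := pvFFSpec cs c (k + 1) (by omega) h2
    set F := PySem.Chars.findFrom cs [c] ((k + 1 : Nat) : Int) with hF
    have hFnn : ((F.toNat : Nat) : Int) = F := Int.toNat_of_nonneg (by omega)
    rw [← hFnn]
    apply pvFFUnique cs c k F.toNat (by omega) (by omega) hflen hce
    intro j hj1 hj2
    rcases Nat.eq_or_lt_of_le hj1 with h | h
    · rw [← h]; exact hc
    · exact hmin j (by omega) hj2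

theorem pvRefresh (cs : List Char) (c : Char) (jq i : Nat) (q : Int)
    (hj : jq ≤ i) (hi : i ≤ cs.length)
    (hq : q = PySem.Chars.findFrom cs [c] (jq : Int)) :
    (if q ≠ -1 ∧ q < (i : Int) then PySem.Chars.findFrom cs [c] (i : Int) else q) =
      PySem.Chars.findFrom cs [c] (i : Int) := by
  split_ifs with h
  · rfl
  · push_neg at h
    by_cases hq1 : q = -1
    · subst hq1
      symm
      rw [pvFFNone cs c i hi]
      intro j hj1 hj2
      exact (pvFFNone cs c jq (by omega)).mp hq.symm j (by omega) hj2
    · have hiq := h hq1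
      obtain ⟨h1, hflen, hce, hmin⟩ := pvFFSpec cs c jq (by omega) (by rw [← hq]; exact hq1)
      rw [← hq] at h1 hflen hce hmin
      have hqnn : ((q.toNat : Nat) : Int) = q := Int.toNat_of_nonneg (by omega)
      symm
      rw [hq, pvFFUnique cs c i q.toNat hi (by omega) hflen hce
        (fun j hj1 hj2 => hmin j (by omega) hj2), ← hq, hqnn]

theorem pvAccAAux : ∀ (d : Nat) (cs : List Char) (i : Nat) (parts : List (List Char)),
    cs.length - i ≤ d →
    pvAQuoted cs i parts = (parts.flatten ++ (pvAQuoted cs i []).1, (pvAQuoted cs i []).2) := by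
  intro d
  induction d with
  | zero =>
    intro cs i parts hd
    rw [pvAQuoted.eq_def, pvAQuoted.eq_def (result := [])]
    rw [dif_neg (by omega), dif_neg (by omega)]
    simp [pvJoinNil]
  | succ d IH =>
    intro cs i parts hd
    rw [pvAQuoted.eq_def, pvAQuoted.eq_def (result := [])]
    by_cases h : i < cs.length
    · rw [dif_pos h, dif_pos h]
      split_ifs with h1 h2 h3
      · rw [IH cs (i + 2) _ (by omega), IH cs (i + 2) ([] ++ _) (by omega)]
        simp
      · rw [IH cs (i + 2) _ (by omega), IH cs (i + 2) ([] ++ _) (by omega)]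
        simp
      · simp [pvJoinNil]
      · rw [IH cs (i + 1) _ (by omega), IH cs (i + 1) ([] ++ _) (by omega)]
        simp
    · rw [dif_neg h, dif_neg h]; simp [pvJoinNil]

theorem pvAccA (cs : List Char) (i : Nat) (parts : List (List Char)) :
    pvAQuoted cs i parts = (parts.flatten ++ (pvAQuoted cs i []).1, (pvAQuoted cs i []).2) :=
  pvAccAAux (cs.length - i) cs i parts le_rfl

theorem pvAccAlign (cs : List Char) (i : Nat) (P1 P2 : List (List Char))
    (h : P1.flatten = P2.flatten) : pvAQuoted cs i P1 = pvAQuoted cs i P2 := by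
  rw [pvAccA cs i P1, pvAccA cs i P2, h]

theorem pvSliceNat (cs : List Char) (a b : Nat) :
    PySem.List.slice cs (some ((a : Nat) : Int)) (some ((b : Nat) : Int)) = (cs.drop a).take (b - a) := by
  rw [PySem.List.slice_natCast]

theorem pvSkipAux : ∀ (d : Nat) (cs : List Char) (i m : Nat) (parts : List (List Char)),
    m - i ≤ d → i ≤ m → m ≤ cs.length →
    (∀ j, i ≤ j → j < m → cs.getD j default ≠ '\\' ∧ cs.getD j default ≠ '\'') →
    pvAQuoted cs i parts =
      pvAQuoted cs m (parts ++ ((cs.drop i).take (m - i)).map (fun c => [c])) := by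
  intro d
  induction d with
  | zero =>
    intro cs i m parts hd him hm _
    have : i = m := by omega
    subst this
    simp
  | succ d IH =>
    intro cs i m parts hd him hm hno
    rcases Nat.eq_or_lt_of_le him with he | hlt
    · subst he; simp
    · have hi : i < cs.length := by omega
      have hcs := hno i le_rfl hlt
      rw [List.getD_eq_getElem cs default hi] at hcs
      conv_lhs => rw [pvAQuoted.eq_def]
      rw [dif_pos hi, if_neg (by tauto), if_neg hcs.2]
      rw [IH cs (i + 1) m _ (by omega) (by omega) hm (fun j hj1 hj2 => hno j (by omega) hj2)]
      have hdrop : cs.drop i = cs[i] :: cs.drop (i + 1) := List.drop_eq_getElem_cons hi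
      rw [hdrop, show m - i = (m - (i + 1)) + 1 by omega, List.take_succ_cons, List.map_cons]
      simp

theorem pvULAux : ∀ (d : Nat) (cs : List Char) (e : Nat),
    cs.length - e ≤ d → e ≤ cs.length →
    ([',', ')'].foldl (fun acc dch =>
        let k := PySem.Chars.findFrom cs [dch] ((e : Nat) : Int)
        if k ≠ -1 ∧ k < acc then k else acc) ((cs.length : Nat) : Int))
      = ((pvAEnd cs e : Nat) : Int) := by
  intro d
  induction d with
  | zero =>
    intro cs e hd he
    rw [pvAEnd.eq_def, dif_neg (by omega)]
    simp only [List.foldl]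
    rw [show ((e : Nat) : Int) = ((cs.length : Nat) : Int) by omega,
        (pvFFNone cs ',' cs.length le_rfl).mpr (by omega),
        (pvFFNone cs ')' cs.length le_rfl).mpr (by omega)]
    norm_num
  | succ d IH =>
    intro cs e hd he
    rcases Nat.eq_or_lt_of_le he with hel | hel
    · rw [pvAEnd.eq_def, dif_neg (by omega)]
      simp only [List.foldl]
      rw [show ((e : Nat) : Int) = ((cs.length : Nat) : Int) by omega,
          (pvFFNone cs ',' cs.length le_rfl).mpr (by omega),
          (pvFFNone cs ')' cs.length le_rfl).mpr (by omega)]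
      norm_num
    · have hgd := List.getD_eq_getElem cs default hel
      simp only [List.foldl]
      by_cases hc : cs[e] = ','
      · have hcond : ¬¬(cs[e] = ',' ∨ cs[e] = ')') := by tauto
        conv_rhs => rw [pvAEnd.eq_def, dif_pos hel, if_neg hcond]
        rw [pvFFHit cs ',' e hel (by rw [hgd, hc])]
        have hk2 : PySem.Chars.findFrom cs [')'] ((e : Nat) : Int) = -1 ∨
            ((e : Nat) : Int) ≤ PySem.Chars.findFrom cs [')'] ((e : Nat) : Int) := by
          by_cases h2 : PySem.Chars.findFrom cs [')'] ((e : Nat) : Int) = -1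
          · exact Or.inl h2
          · exact Or.inr (pvFFSpec cs ')' e (by omega) h2).1
        split_ifs <;> omega
      · by_cases hc2 : cs[e] = ')'
        · have hcond : ¬¬(cs[e] = ',' ∨ cs[e] = ')') := by tauto
          conv_rhs => rw [pvAEnd.eq_def, dif_pos hel, if_neg hcond]
          rw [pvFFHit cs ')' e hel (by rw [hgd, hc2])]
          have hk1 : PySem.Chars.findFrom cs [','] ((e : Nat) : Int) = -1 ∨
              (((e : Nat) : Int) < PySem.Chars.findFrom cs [','] ((e : Nat) : Int) ∧
               PySem.Chars.findFrom cs [','] ((e : Nat) : Int) < ((cs.length : Nat) : Int)) := by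
            by_cases h2 : PySem.Chars.findFrom cs [','] ((e : Nat) : Int) = -1
            · exact Or.inl h2
            · obtain ⟨hge, hlen2, hcf, _⟩ := pvFFSpec cs ',' e (by omega) h2
              refine Or.inr ⟨?_, by omega⟩
              rcases lt_or_eq_of_le hge with h | h
              · exact h
              · exfalso
                apply hc
                rw [← hgd, show e = (PySem.Chars.findFrom cs [','] ((e : Nat) : Int)).toNat by omega]
                exact hcf
          split_ifs <;> omega
        · have hcond : ¬(cs[e] = ',' ∨ cs[e] = ')') := by tauto
          conv_rhs => rw [pvAEnd.eq_def, dif_pos hel, if_pos hcond]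
          rw [← IH cs (e + 1) (by omega) (by omega)]
          simp only [List.foldl]
          rw [pvFFStep cs ',' e hel (by rw [hgd]; exact hc),
              pvFFStep cs ')' e hel (by rw [hgd]; exact hc2)]

theorem pvMainEnd (cs : List Char) (fuel : Nat) (q b : Int) (parts : List (List Char))
    (hq : ∃ jq, jq ≤ cs.length ∧ q = PySem.Chars.findFrom cs ['\''] ((jq : Nat) : Int))
    (hb : ∃ jb, jb ≤ cs.length ∧ b = PySem.Chars.findFrom cs ['\\'] ((jb : Nat) : Int))
    (hf : 0 < fuel) :
    pvBQuoted cs fuel cs.length q b parts = pvAQuoted cs cs.length parts := by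
  obtain ⟨fuel, rfl⟩ : ∃ f, fuel = f + 1 := ⟨fuel - 1, by omega⟩
  obtain ⟨jq, hjq, rfl⟩ := hq
  obtain ⟨jb, hjb, rfl⟩ := hb
  simp only [pvBQuoted]
  rw [pvRefresh cs '\'' jq cs.length _ hjq le_rfl rfl,
      pvRefresh cs '\\' jb cs.length _ hjb le_rfl rfl]
  rw [(pvFFNone cs '\'' cs.length le_rfl).mpr (by omega),
      (pvFFNone cs '\\' cs.length le_rfl).mpr (by omega)]
  rw [if_neg (by omega), if_neg (by omega)]
  rw [pvAQuoted.eq_def, dif_neg (by omega)]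
  rw [PySem.List.slice_from cs (by omega)]
  simp [pvJoinNil]

theorem pvMainAux : ∀ (d : Nat) (cs : List Char) (i fuel : Nat) (q b : Int) (parts : List (List Char)),
    cs.length - i ≤ d → i ≤ cs.length → cs.length - i < fuel →
    (∃ jq, jq ≤ i ∧ q = PySem.Chars.findFrom cs ['\''] ((jq : Nat) : Int)) →
    (∃ jb, jb ≤ i ∧ b = PySem.Chars.findFrom cs ['\\'] ((jb : Nat) : Int)) →
    pvBQuoted cs fuel i q b parts = pvAQuoted cs i parts := by
  intro d
  induction d with
  | zero =>
    intro cs i fuel q b parts hd hi hf hq hb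
    have hie : i = cs.length := by omega
    subst hie
    exact pvMainEnd cs fuel q b parts (by simpa using hq) (by simpa using hb) (by omega)
  | succ d IH =>
    intro cs i fuel q b parts hd hi hf hq hb
    rcases Nat.eq_or_lt_of_le hi with hil | hil
    · subst hil
      exact pvMainEnd cs fuel q b parts (by simpa using hq) (by simpa using hb) (by omega)
    · obtain ⟨fuel, rfl⟩ : ∃ f, fuel = f + 1 := ⟨fuel - 1, by omega⟩
      obtain ⟨jq, hjq, rfl⟩ := hq
      obtain ⟨jb, hjb, rfl⟩ := hb
      simp only [pvBQuoted]
      rw [pvRefresh cs '\'' jq i _ hjq (by omega) rfl,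
          pvRefresh cs '\\' jb i _ hjb (by omega) rfl]
      set Q := PySem.Chars.findFrom cs ['\''] ((i : Nat) : Int) with hQdef
      set B := PySem.Chars.findFrom cs ['\\'] ((i : Nat) : Int) with hBdef
      by_cases hc1 : B ≠ -1 ∧ (Q = -1 ∨ B < Q)
      · -- the next special character is a backslash, at index m
        obtain ⟨hge, hmlen, hmc, hmin⟩ := pvFFSpec cs '\\' i (by omega) (by rw [← hBdef]; exact hc1.1)
        rw [← hBdef] at hge hmlen hmc hmin
        set m := B.toNat with hmdef
        have hBm : B = ((m : Nat) : Int) := by omega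
        have him : i ≤ m := by omega
        have hnoQ : ∀ j, i ≤ j → j ≤ m → cs.getD j default ≠ '\'' := by
          intro j hj1 hj2
          rcases hc1.2 with hQ1 | hQ2
          · exact (pvFFNone cs '\'' i (by omega)).mp (by rw [← hQdef]; exact hQ1) j hj1 (by omega)
          · obtain ⟨_, _, _, hmin'⟩ := pvFFSpec cs '\'' i (by omega) (by rw [← hQdef]; omega)
            rw [← hQdef] at hmin'
            exact hmin' j hj1 (by omega)
        have hno : ∀ j, i ≤ j → j < m → cs.getD j default ≠ '\\' ∧ cs.getD j default ≠ '\'' :=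
          fun j h1 h2 => ⟨hmin j h1 (by omega), hnoQ j h1 (by omega)⟩
        rw [if_pos hc1]
        rw [pvSkipAux (m - i) cs i m parts le_rfl him (by omega) hno]
        have hgdm := List.getD_eq_getElem cs default hmlen
        by_cases hb1 : B + 1 < (cs.length : Int)
        · rw [if_pos hb1]
          conv_rhs => rw [pvAQuoted.eq_def]
          rw [dif_pos hmlen, if_pos ⟨by rw [← hgdm]; exact hmc, by omega⟩]
          rw [IH cs (m + 2) fuel Q B _ (by omega) (by omega) (by omega)
            ⟨i, by omega, hQdef⟩ ⟨i, by omega, hBdef⟩]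
          apply pvAccAlign
          rw [hBm, show ((m : Nat) : Int) + 2 = (((m + 2 : Nat)) : Int) by push_cast; ring]
          rw [pvSliceNat cs i (m + 2), pvSliceNat cs m (m + 2)]
          simp only [List.flatten_append, List.flatten_cons, List.flatten_nil, pvFlattenSingletons]
          rw [show (m + 2 - i) = (m - i) + 2 by omega, List.take_add]
          rw [show (m + 2 - m) = 2 by omega]
          rw [List.drop_drop]
          rw [show i + (m - i) = m by omega]
          simp [List.append_assoc]
        · rw [if_neg hb1]
          have hm1 : m + 1 = cs.length := by omega
          conv_rhs => rw [pvAQuoted.eq_def]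
          rw [dif_pos hmlen,
              if_neg (fun h => by omega),
              if_neg (by rw [← hgdm, hmc]; decide)]
          conv_rhs => rw [pvAQuoted.eq_def]
          rw [dif_neg (by omega)]
          rw [PySem.List.slice_from cs (by omega)]
          have hit : ((i : Nat) : Int).toNat = i := by omega
          rw [hit]
          have hdropi : cs.drop i = (cs.drop i).take (m - i) ++ [cs[m]] := by
            conv_lhs => rw [← List.take_append_drop (m - i) (cs.drop i)]
            congr 1
            rw [List.drop_drop, show i + (m - i) = m by omega]
            rw [List.drop_eq_getElem_cons hmlen]
            rw [show m + 1 = cs.length by omega]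
            simp
          simp only [pvJoinNil, List.flatten_append, List.flatten_cons, List.flatten_nil,
            pvFlattenSingletons]
          rw [Prod.ext_iff]
          constructor
          · simp only []
            conv_lhs => rw [hdropi]
            simp [List.append_assoc]
          · simp
            omega
      · by_cases hc2 : Q ≠ -1
        · -- the next special character is a quote, at index m
          rw [if_neg hc1, if_pos hc2]
          obtain ⟨hge, hmlen, hmc, hmin⟩ := pvFFSpec cs '\'' i (by omega) (by rw [← hQdef]; exact hc2)
          rw [← hQdef] at hge hmlen hmc hmin
          set m := Q.toNat with hmdef
          have hQm : Q = ((m : Nat) : Int) := by omega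
          have him : i ≤ m := by omega
          have hnoB : ∀ j, i ≤ j → j < m → cs.getD j default ≠ '\\' := by
            intro j hj1 hj2
            by_cases hB1 : B = -1
            · exact (pvFFNone cs '\\' i (by omega)).mp (by rw [← hBdef]; exact hB1) j hj1 (by omega)
            · have hQB : Q ≤ B := by
                rcases not_and_or.mp hc1 with h | h
                · exact absurd (not_not.mp h) hB1
                · push_neg at h
                  exact h.2
              obtain ⟨_, _, _, hmin'⟩ := pvFFSpec cs '\\' i (by omega) (by rw [← hBdef]; exact hB1)
              rw [← hBdef] at hmin'
              exact hmin' j hj1 (by omega)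
          have hno : ∀ j, i ≤ j → j < m → cs.getD j default ≠ '\\' ∧ cs.getD j default ≠ '\'' :=
            fun j h1 h2 => ⟨hnoB j h1 h2, hmin j h1 (by omega)⟩
          rw [pvSkipAux (m - i) cs i m parts le_rfl him (by omega) hno]
          have hgdm := List.getD_eq_getElem cs default hmlen
          have hcm : cs[m] = '\'' := by rw [← hgdm]; exact hmc
          conv_rhs => rw [pvAQuoted.eq_def]
          rw [dif_pos hmlen,
              if_neg (show ¬(cs[m] = '\\' ∧ m + 1 < cs.length) from fun h => by
                rw [hcm] at h; exact absurd h.1 (by decide)),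
              if_pos hcm]
          by_cases hdq : m + 1 < cs.length ∧ cs.getD (m + 1) default = '\''
          · rw [if_pos (show Q + 1 < (cs.length : Int) ∧ cs.getD (m + 1) default = '\'' from
              ⟨by omega, hdq.2⟩), if_pos hdq]
            rw [IH cs (m + 2) fuel Q B _ (by omega) (by omega) (by omega)
              ⟨i, by omega, hQdef⟩ ⟨i, by omega, hBdef⟩]
            apply pvAccAlign
            rw [hQm, pvSliceNat cs i m]
            simp [List.append_assoc]
            rw [← List.map_drop, ← List.map_take, pvFlattenSingletons]
          · rw [if_neg (fun h => hdq ⟨by omega, h.2⟩), if_neg hdq]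
            rw [hQm, pvSliceNat cs i m]
            simp only [pvJoinNil, List.flatten_append, List.flatten_cons, List.flatten_nil,
              pvFlattenSingletons]
            rw [Prod.ext_iff]
            constructor
            · simp
            · simp
        · -- no special character remains
          rw [if_neg hc1, if_neg hc2]
          have hQ1 : Q = -1 := not_not.mp hc2
          have hB1 : B = -1 := by
            by_contra hB1
            exact hc1 ⟨hB1, Or.inl hQ1⟩
          have hno : ∀ j, i ≤ j → j < cs.length →
              cs.getD j default ≠ '\\' ∧ cs.getD j default ≠ '\'' := fun j h1 h2 =>
            ⟨(pvFFNone cs '\\' i (by omega)).mp (by rw [← hBdef]; exact hB1) j h1 h2,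
             (pvFFNone cs '\'' i (by omega)).mp (by rw [← hQdef]; exact hQ1) j h1 h2⟩
          rw [pvSkipAux (cs.length - i) cs i cs.length parts le_rfl (by omega) le_rfl hno]
          conv_rhs => rw [pvAQuoted.eq_def]
          rw [dif_neg (by omega)]
          rw [PySem.List.slice_from cs (by omega)]
          have hit : ((i : Nat) : Int).toNat = i := by omega
          rw [hit]
          have htake : (cs.drop i).take (cs.length - i) = cs.drop i := by
            have hl : cs.length - i = (cs.drop i).length := by simp
            rw [hl, List.take_length]
          rw [htake]
          simp [pvJoinNil, List.flatten_append]
          rw [← List.map_drop, pvFlattenSingletons]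

-- ===== VERDICT (by name: the statement is the Claim_ definition above) =====
theorem parse_sql_value_spec : Claim_equal_parse_sql_value := by
  intro s start _ hpre
  have h0 : (0 : Int) ≤ start := hpre
  obtain ⟨st, rfl⟩ : ∃ st : Nat, start = ((st : Nat) : Int) :=
    ⟨start.toNat, (Int.toNat_of_nonneg h0).symm⟩
  simp only [Spec_parse_sql_value, parse_sql_value, parse_sql_value_alt, Int.toNat_natCast]
  by_cases hge : ((st : Nat) : Int) ≥ (s.toList.length : Int)
  · rw [if_pos hge, if_pos hge]
  · rw [if_neg hge, if_neg hge]
    have hlt : st < s.toList.length := by omega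
    by_cases hq : PySem.List.pyGet? s.toList ((st : Nat) : Int) = some '\''
    · rw [if_pos hq, if_neg (not_not.mpr hq)]
      rw [pvMainAux s.toList.length s.toList (st + 1) (s.toList.length + 1) _ _ []
        (by omega) (by omega) (by omega)
        ⟨st + 1, le_rfl, rfl⟩ ⟨st + 1, le_rfl, rfl⟩]
    · rw [if_neg hq, if_pos hq]
      rw [pvULAux s.toList.length s.toList st (by omega) (by omega)]
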